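-- pv_equiv track=rewrite | github.com/brankockica/Data-extraction-and-manipulation | Projects Data.py | extract_key_value_pairs
-- ===== SOURCE A (Python) =====
-- def extract_key_value_pairs(text):
--     # Split the text into lines
--     lines = text.split('\n')
--     # Find the index of the line containing "Address"
--     address_index = next((i for i, line in enumerate(lines) if "Address" in line), None)
--     # Extract the desired information if "Address" is found
--     if address_index is not None:
--         # Ensure we have enough lines to extract
--         if len(lines) > address_index + 1:
--             # Extract "Address" line and the following line
--             address_info = {
--                 "Address": lines[address_index],
--                 "Value": lines[address_index + 1]
--             }
--             return address_info
--     return None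
-- ===== SOURCE B (Python) =====
-- def extract_key_value_pairs(text):
--     # Single streaming pass over the characters: keep the current line in a
--     # buffer; once a line containing "Address" is terminated by a newline,
--     # the next buffered line (ended by '\n' or by the end of text) is the value.
--     cur = []        # characters of the line being read
--     found = None    # the completed "Address" line, once one has ended
--     for ch in text:
--         if ch == '\n':
--             line = ''.join(cur)
--             if found is not None:
--                 return {"Address": found, "Value": line}
--             if "Address" in line:
--                 found = line
--             cur = []
--         else:
--             cur.append(ch)
--     if found is not None:
--         return {"Address": found, "Value": ''.join(cur)}
--     return None
-- ===== Notes on version B (the rewrite author's own statement) =====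
-- stated objective: alternative
-- what changed: B is a single character-level streaming state machine (buffer the current line, latch the completed 'Address' line, emit at the next line end) instead of A's split-into-a-list, index search with enumerate/next, length check and re-indexing; B never materialises the list of lines.
import Mathlib
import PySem

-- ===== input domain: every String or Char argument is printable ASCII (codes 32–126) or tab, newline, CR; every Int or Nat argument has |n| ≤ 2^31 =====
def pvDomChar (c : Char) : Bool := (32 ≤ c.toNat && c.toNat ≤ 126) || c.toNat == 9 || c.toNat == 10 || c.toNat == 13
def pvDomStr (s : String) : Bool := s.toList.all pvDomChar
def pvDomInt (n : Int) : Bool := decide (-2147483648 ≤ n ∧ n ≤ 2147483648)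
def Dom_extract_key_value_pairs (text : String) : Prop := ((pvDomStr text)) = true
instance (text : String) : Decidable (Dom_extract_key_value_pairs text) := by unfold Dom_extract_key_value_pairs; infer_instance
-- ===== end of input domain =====

-- B replaces A's split-into-lines + index search + length check by one streaming
-- character pass with a line buffer and a latch; same O(n) cost, no line list built.

-- ===== PORT A =====
-- next((i for i, line in enumerate(lines) if "Address" in line), None)
def pvFindAddr : List String → Nat → Option Nat
  | [], _ => none
  | line :: rest, i =>
      if PySem.Str.isIn "Address" line then some i else pvFindAddr rest (i + 1)

def pvExtractA (lines : List String) : Option (List (String × String)) :=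
  match pvFindAddr lines 0 with
  | none => none
  | some i =>
      if lines.length > i + 1 then
        -- lines[address_index] / lines[address_index + 1]: the index is a
        -- nonnegative in-range Nat here, so plain getElem? is exact
        match lines[i]?, lines[i + 1]? with
        | some a, some v => some [("Address", a), ("Value", v)]
        | _, _ => none
      else none

def extract_key_value_pairs (text : String) : Option (List (String × String)) :=
  -- text.split('\n'): sep ≠ "", so split? is some
  pvExtractA ((PySem.Str.split? text "\n").getD [])

-- ===== PORT B =====
-- the for-loop over the characters of text, with state (cur, found);
-- ''.join(cur) of the single appended characters is String.ofList cur
def pvScanB : List Char → List Char → Option (List Char) → Option (List (String × String))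
  | [], cur, found =>
      match found with
      | some f => some [("Address", String.ofList f), ("Value", String.ofList cur)]
      | none => none
  | ch :: rest, cur, found =>
      if ch = '\n' then
        match found with
        | some f => some [("Address", String.ofList f), ("Value", String.ofList cur)]
        | none =>
            if PySem.Chars.isIn "Address".toList cur then pvScanB rest [] (some cur)
            else pvScanB rest [] none
      else pvScanB rest (cur ++ [ch]) found

def extract_key_value_pairs_alt (text : String) : Option (List (String × String)) :=
  pvScanB text.toList [] none

-- ===== PRECONDITION & SPEC =====
def Spec_extract_key_value_pairs (text : String) (out : Option (List (String × String))) : Prop := out = extract_key_value_pairs_alt text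
instance (text : String) (out : Option (List (String × String))) : Decidable (Spec_extract_key_value_pairs text out) := by unfold Spec_extract_key_value_pairs; infer_instance

-- ===== CLAIM (what is proved, stated in full; the proofs are below) =====
def Claim_equal_extract_key_value_pairs : Prop := ∀ (text : String), Dom_extract_key_value_pairs text → Spec_extract_key_value_pairs text (extract_key_value_pairs text)

-- ===== LEMMAS AND PROOFS =====

-- structural splitting of a char list into its '\n'-lines
def pvLineSplit : List Char → List (List Char)
  | [] => [[]]
  | c :: r => if c = '\n' then [] :: pvLineSplit r
              else match pvLineSplit r with
                   | [] => [[c]]          -- unreachable: pvLineSplit is never []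
                   | h :: t => (c :: h) :: t

-- prepend a prefix to the first line
def pvMapHead (p : List Char) : List (List Char) → List (List Char)
  | [] => []
  | h :: t => (p ++ h) :: t

-- A's algorithm expressed directly on char lines
def pvExtractCore : List (List Char) → Option (List (String × String))
  | [] => none
  | l :: ls =>
      if PySem.Chars.isIn "Address".toList l then
        match ls with
        | [] => none
        | v :: _ => some [("Address", String.ofList l), ("Value", String.ofList v)]
      else pvExtractCore ls

theorem pvLineSplit_ne_nil (s : List Char) : pvLineSplit s ≠ [] := by
  cases s with
  | nil => simp [pvLineSplit]
  | cons c r =>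
      simp only [pvLineSplit]
      split
      · simp
      · split <;> simp

theorem pvLineSplit_head (s : List Char) :
    (pvLineSplit s).head? = some (s.takeWhile (· ≠ '\n')) := by
  induction s with
  | nil => simp [pvLineSplit]
  | cons c r ih =>
      by_cases h : c = '\n'
      · simp [pvLineSplit, h, List.takeWhile]
      · simp only [pvLineSplit, if_neg h]
        cases hr : pvLineSplit r with
        | nil => exact absurd hr (pvLineSplit_ne_nil r)
        | cons hd tl =>
            rw [hr] at ih
            simp only [List.head?] at ih
            simp [List.takeWhile, h, Option.some.injEq] at ih ⊢
            exact ih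

-- the fuel-based splitOn.go on sep = ['\n'] is pvLineSplit
theorem pvGo_eq (fuel : Nat) (l cur : List Char) (acc : List (List Char))
    (h : l.length < fuel) :
    PySem.Chars.splitOn.go ['\n'] fuel l cur acc
      = acc.reverse ++ pvMapHead cur.reverse (pvLineSplit l) := by
  induction fuel generalizing l cur acc with
  | zero => omega
  | succ fuel ih =>
      cases l with
      | nil =>
          rw [PySem.Chars.splitOn.go.eq_def]
          simp [pvLineSplit, pvMapHead]
      | cons c rest =>
          rw [PySem.Chars.splitOn.go.eq_def]
          simp only []
          by_cases hc : c = '\n'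
          · have hpre : List.isPrefixOf ['\n'] (c :: rest) = true := by
              simp [List.isPrefixOf, hc]
            rw [if_pos hpre]
            have : List.drop (List.length ['\n']) (c :: rest) = rest := by simp
            rw [this, ih rest [] (cur.reverse :: acc) (by simp at h; omega)]
            simp [pvLineSplit, hc, pvMapHead]
            cases hr : pvLineSplit rest with
            | nil => exact absurd hr (pvLineSplit_ne_nil rest)
            | cons hd tl => simp
          · have hpre : List.isPrefixOf ['\n'] (c :: rest) = false := by
              simp [List.isPrefixOf]
              exact fun hcc => absurd hcc.symm hc
            rw [if_neg (by simp [hpre])]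
            rw [ih rest (c :: cur) acc (by simp at h; omega)]
            simp only [pvLineSplit, if_neg hc]
            cases hr : pvLineSplit rest with
            | nil => exact absurd hr (pvLineSplit_ne_nil rest)
            | cons hd tl => simp [pvMapHead]

theorem pvSplit_eq (s : List Char) :
    PySem.Chars.splitOn s ['\n'] = pvLineSplit s := by
  have := pvGo_eq (s.length + 1) s [] [] (by omega)
  rw [PySem.Chars.splitOn] at *
  rw [this]
  cases hr : pvLineSplit s with
  | nil => exact absurd hr (pvLineSplit_ne_nil s)
  | cons hd tl => simp [pvMapHead]

-- A's index-search-and-check equals the direct first-hit-with-next scan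
theorem pvFindAddr_shift (l : List String) (n : Nat) :
    pvFindAddr l (n + 1) = (pvFindAddr l n).map (· + 1) := by
  induction l generalizing n with
  | nil => simp [pvFindAddr]
  | cons line rest ih =>
      by_cases h : PySem.Str.isIn "Address" line = true
      · simp only [pvFindAddr]; rw [if_pos h, if_pos h]; rfl
      · simp only [pvFindAddr]; rw [if_neg h, if_neg h, ih]

theorem pvA_core (ls : List (List Char)) :
    pvExtractA (ls.map String.ofList) = pvExtractCore ls := by
  induction ls with
  | nil => simp [pvExtractA, pvFindAddr, pvExtractCore]
  | cons l rest ih =>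
      have hiff : PySem.Str.isIn "Address" (String.ofList l)
          = PySem.Chars.isIn "Address".toList l := by
        simp [PySem.Str.isIn]
      by_cases h : PySem.Chars.isIn "Address".toList l = true
      · simp only [pvExtractCore, List.map, pvExtractA, pvFindAddr, hiff]
        rw [if_pos h, if_pos h]
        cases rest with
        | nil => simp
        | cons v t => simp
      · simp only [pvExtractCore, List.map, pvExtractA, pvFindAddr, hiff]
        rw [if_neg h, if_neg h]
        rw [pvFindAddr_shift]
        rw [pvExtractA] at ih
        cases hf : pvFindAddr (rest.map String.ofList) 0 with
        | none => rw [hf] at ih; simpa using ih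
        | some j =>
            rw [hf] at ih
            have ih2 : (if (List.map String.ofList rest).length > j + 1 then
                match (List.map String.ofList rest)[j]?, (List.map String.ofList rest)[j + 1]? with
                | some a, some v => some [("Address", a), ("Value", v)]
                | _, _ => none
              else none) = pvExtractCore rest := ih
            clear ih
            simp only [Option.map_some]
            by_cases hl : (rest.map String.ofList).length > j + 1
            · rw [if_pos hl] at ih2
              rw [if_pos (show (String.ofList l :: rest.map String.ofList).length > (j + 1) + 1 by
                simp at hl ⊢; omega)]
              simp only [List.getElem?_cons_succ]
              exact ih2
            · rw [if_neg hl] at ih2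
              rw [if_neg (show ¬ (String.ofList l :: rest.map String.ofList).length > (j + 1) + 1 by
                simp at hl ⊢; omega)]
              exact ih2

-- once the Address line is latched, B returns it with the rest of the current line
theorem pvB_found (rest cur f : List Char) :
    pvScanB rest cur (some f)
      = some [("Address", String.ofList f),
              ("Value", String.ofList (cur ++ rest.takeWhile (· ≠ '\n')))] := by
  induction rest generalizing cur with
  | nil => simp [pvScanB]
  | cons c r ih =>
      by_cases h : c = '\n'
      · simp [pvScanB, h, List.takeWhile]
      · simp only [pvScanB, if_neg h, ih, List.takeWhile]
        simp [h]

-- B's streaming pass computes A's scan over the line decomposition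
theorem pvB_none (rest cur : List Char) :
    pvScanB rest cur none = pvExtractCore (pvMapHead cur (pvLineSplit rest)) := by
  induction rest generalizing cur with
  | nil =>
      simp only [pvScanB, pvLineSplit, pvMapHead, pvExtractCore]
      split <;> rfl
  | cons c r ih =>
      by_cases h : c = '\n'
      · subst h
        by_cases hhit : PySem.Chars.isIn "Address".toList cur = true
        · have hhitL : PySem.Chars.isIn ['A', 'd', 'd', 'r', 'e', 's', 's'] cur = true := hhit
          rw [show pvScanB ('\n' :: r) cur none = pvScanB r [] (some cur) from by
            simp [pvScanB, hhitL]]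
          rw [pvB_found]
          have hh := pvLineSplit_head r
          cases hr : pvLineSplit r with
          | nil => exact absurd hr (pvLineSplit_ne_nil r)
          | cons hd tl =>
              rw [hr] at hh
              simp only [List.head?, Option.some.injEq] at hh
              simp [pvLineSplit, pvMapHead, pvExtractCore, hhitL, hr, hh]
        · have hhitL : PySem.Chars.isIn ['A', 'd', 'd', 'r', 'e', 's', 's'] cur = false := by
            simpa using hhit
          rw [show pvScanB ('\n' :: r) cur none = pvScanB r [] none from by
            simp [pvScanB, hhitL]]
          rw [ih]
          cases hr : pvLineSplit r with
          | nil => exact absurd hr (pvLineSplit_ne_nil r)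
          | cons hd tl => simp [pvLineSplit, pvMapHead, pvExtractCore, hhitL, hr]
      · cases hr : pvLineSplit r with
        | nil => exact absurd hr (pvLineSplit_ne_nil r)
        | cons hd tl =>
            rw [show pvScanB (c :: r) cur none = pvScanB r (cur ++ [c]) none from by
              simp [pvScanB, h]]
            rw [ih, hr, show pvLineSplit (c :: r) = (c :: hd) :: tl from by
              simp [pvLineSplit, h, hr]]
            simp [pvMapHead]

-- ===== VERDICT (by name: the statement is the Claim_ definition above) =====
theorem extract_key_value_pairs_spec : Claim_equal_extract_key_value_pairs := by
  intro text _
  show extract_key_value_pairs text = extract_key_value_pairs_alt text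
  have h1 : extract_key_value_pairs text
      = pvExtractA ((PySem.Chars.splitOn text.toList ['\n']).map String.ofList) := rfl
  rw [h1, pvSplit_eq, pvA_core, extract_key_value_pairs_alt, pvB_none]
  cases hr : pvLineSplit text.toList with
  | nil => exact absurd hr (pvLineSplit_ne_nil text.toList)
  | cons hd tl => simp [pvMapHead]
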